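-- pv_equiv track=rewrite | github.com/BaileyChoi/KB-IT-s-Your-Life | Algorithm_Test/mid/Get_report_results.py | solution
-- ===== SOURCE A (Python) =====
-- def solution(id_list, report, k):
--     # mail_dict 생성 (id: 메일 수)
--     mail_dict = {id: 0 for id in id_list}
--
--     # report_dict 생성 (id: repoter1, repoter2, ...)
--     report_dict = {id: [] for id in id_list}
--
--     # 중복 신고 제거
--     report = set(report)
--
--     # 신고 처리
--     for r in report:
--         reporter, target = r.split()
--         report_dict[target].append(reporter)
--
--     # 유저 정지, 메일 발송 처리
--     for target, reporters in report_dict.items():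
--         if len(reporters) >= k:
--             for reporter in reporters:
--                 mail_dict[reporter] += 1
--
--     return list(mail_dict.values())
-- ===== SOURCE B (Python) =====
-- def solution(id_list, report, k):
--     reports = set(report)
--
--     # frequency table: target -> number of distinct reports against it
--     cnt = {}
--     for r in reports:
--         t = r.split()[1]
--         cnt[t] = cnt.get(t, 0) + 1
--
--     mail_dict = {id: 0 for id in id_list}
--
--     # one threshold-filtered pass over the distinct reports
--     for r in reports:
--         reporter, target = r.split()
--         if cnt[target] >= k:
--             mail_dict[reporter] += 1
--
--     return list(mail_dict.values())
-- ===== Notes on version B (the rewrite author's own statement) =====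
-- stated objective: alternative
-- what changed: B replaces A's per-target reporter lists and nested increment loop by a flat frequency table (target -> distinct-report count) plus a single threshold-filtered pass over the distinct reports.
import Mathlib
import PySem

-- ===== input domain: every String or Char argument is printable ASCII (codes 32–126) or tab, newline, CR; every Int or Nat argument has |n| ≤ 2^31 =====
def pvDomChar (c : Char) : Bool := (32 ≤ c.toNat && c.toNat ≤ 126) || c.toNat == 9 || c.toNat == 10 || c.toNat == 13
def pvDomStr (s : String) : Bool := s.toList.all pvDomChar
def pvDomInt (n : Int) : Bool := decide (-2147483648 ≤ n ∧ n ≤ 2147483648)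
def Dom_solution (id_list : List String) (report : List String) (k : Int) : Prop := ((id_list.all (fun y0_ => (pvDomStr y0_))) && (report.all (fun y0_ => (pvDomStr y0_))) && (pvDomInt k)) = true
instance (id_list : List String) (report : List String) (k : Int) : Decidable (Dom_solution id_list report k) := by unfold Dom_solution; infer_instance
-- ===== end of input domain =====

-- B replaces A's per-target reporter lists and nested increment loop by a flat
-- frequency table plus one threshold-filtered pass over the distinct reports;
-- objective: alternative (same cost, different data structure).

-- reporter / target of one report string ('r.split()' components; under Pre_ the split has exactly 2 parts)
def pvRep (r : String) : String := (PySem.Str.split₀ r).getD 0 ""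
def pvTgt (r : String) : String := (PySem.Str.split₀ r).getD 1 ""

-- ===== PORT A =====
def solution (id_list : List String) (report : List String) (k : Int) : List Int :=
  let mail_dict : PySem.Dict String Int :=
    id_list.foldl (fun d id => d.insert id 0) PySem.Dict.empty
  let report_dict : PySem.Dict String (List String) :=
    id_list.foldl (fun d id => d.insert id []) PySem.Dict.empty
  let reportSet : PySem.Set String := PySem.Set.ofList report
  -- for r in report: reporter, target = r.split(); report_dict[target].append(reporter)
  -- (KeyError / unpack ValueError are excluded by Pre_; modify/getD model the raising accesses there)
  let report_dict := reportSet.foldl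
    (fun d r => d.modify (pvTgt r) [] (fun l => l ++ [pvRep r])) report_dict
  -- for target, reporters in report_dict.items(): if len(reporters) >= k: for reporter in reporters: mail_dict[reporter] += 1
  let mail_dict := report_dict.items.foldl
    (fun md p => if k ≤ PySem.List.len p.2 then
        p.2.foldl (fun md reporter => md.modify reporter 0 (· + 1)) md
      else md) mail_dict
  mail_dict.values

-- ===== PORT B =====
def solution_alt (id_list : List String) (report : List String) (k : Int) : List Int :=
  let reports : PySem.Set String := PySem.Set.ofList report
  -- cnt[t] = cnt.get(t, 0) + 1
  let cnt : PySem.Dict String Int :=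
    reports.foldl (fun d r => d.insert (pvTgt r) (d.getD (pvTgt r) 0 + 1)) PySem.Dict.empty
  let mail_dict : PySem.Dict String Int :=
    id_list.foldl (fun d id => d.insert id 0) PySem.Dict.empty
  -- for r in reports: reporter, target = r.split(); if cnt[target] >= k: mail_dict[reporter] += 1
  let mail_dict := reports.foldl
    (fun md r => if k ≤ cnt.getD (pvTgt r) 0 then md.modify (pvRep r) 0 (· + 1) else md) mail_dict
  mail_dict.values

-- ===== PRECONDITION & SPEC =====
-- Pre_ excludes exactly the inputs where A raises: a report that does not split into exactly
-- two words (unpack ValueError), a target outside id_list (KeyError in report_dict), or a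
-- reporter outside id_list whose target gathered ≥ k distinct reports (KeyError in mail_dict).
def Pre_solution (id_list : List String) (report : List String) (k : Int) : Prop :=
  ∀ r ∈ report, (PySem.Str.split₀ r).length = 2 ∧ pvTgt r ∈ id_list ∧
    (k ≤ ((PySem.List.dedup report).countP (fun r' => pvTgt r' == pvTgt r) : Int) → pvRep r ∈ id_list)
instance (id_list : List String) (report : List String) (k : Int) : Decidable (Pre_solution id_list report k) := by unfold Pre_solution; infer_instance

def pvWitness_solution : List String × List String × Int :=
  (["muzi", "frodo", "apeach"], ["muzi frodo", "apeach frodo", "frodo muzi"], 2)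

def Spec_solution (id_list : List String) (report : List String) (k : Int) (out : List Int) : Prop := out = solution_alt id_list report k
instance (id_list : List String) (report : List String) (k : Int) (out : List Int) : Decidable (Spec_solution id_list report k out) := by unfold Spec_solution; infer_instance

-- ===== CLAIM (what is proved, stated in full; the proofs are below) =====
def Claim_equal_solution : Prop := ∀ (id_list : List String) (report : List String) (k : Int), Dom_solution id_list report k → Pre_solution id_list report k → Spec_solution id_list report k (solution id_list report k)

-- ===== LEMMAS AND PROOFS =====

-- the {id: c for id in id_list} initial dicts: every lookup with default c yields c
theorem pv_getD_const_init {ν : Type} (l : List String) (d : PySem.Dict String ν) (x : String) (c : ν)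
    (h : d.getD x c = c) :
    (l.foldl (fun d a => d.insert a c) d).getD x c = c := by
  induction l generalizing d with
  | nil => simpa using h
  | cons a l ih =>
      refine ih _ ?_
      rw [PySem.Dict.getD_insert]
      split <;> simp [h]

-- keys of the initial dicts
theorem pv_keys_const_init {ν : Type} (l : List String) (c : ν) :
    (l.foldl (fun d a => d.insert a c) (PySem.Dict.empty : PySem.Dict String ν)).keys
      = PySem.Set.ofList l := by
  have := PySem.Dict.keys_foldl_insert l (fun _ _ => c) (PySem.Dict.empty : PySem.Dict String ν)
  simpa [PySem.Set.update_nil_left] using this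

-- one modify at a present key keeps the key list
theorem pv_keys_modify_present (d : PySem.Dict String Int) (t : String) (f : Int → Int)
    (h : t ∈ d.keys) : (d.modify t 0 f).keys = d.keys := by
  rw [PySem.Dict.keys_modify, PySem.Dict.keys_insert_of_contains]
  exact (PySem.Dict.contains_iff_mem_keys d t).2 h

-- keys are unchanged by an unconditional increment fold over present keys (A's inner loop)
theorem pv_keys_incr_fold (l : List String) (d : PySem.Dict String Int)
    (h : ∀ a ∈ l, a ∈ d.keys) :
    (l.foldl (fun md a => md.modify a 0 (· + 1)) d).keys = d.keys := by
  induction l generalizing d with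
  | nil => rfl
  | cons a l ih =>
      simp only [List.foldl_cons]
      have hk : (d.modify a 0 (· + 1)).keys = d.keys := pv_keys_modify_present d a _ (h a (by simp))
      rw [ih _ (fun b hb => by rw [hk]; exact h b (by simp [hb])), hk]

-- keys are unchanged by a conditional modify-fold whose touched keys are already present (B's mail loop)
theorem pv_keys_modify_fold {α : Type} (l : List α) (key : α → String) (cond : α → Prop)
    [DecidablePred cond] (d : PySem.Dict String Int)
    (h : ∀ a ∈ l, cond a → key a ∈ d.keys) :
    (l.foldl (fun md a => if cond a then md.modify (key a) 0 (· + 1) else md) d).keys = d.keys := by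
  induction l generalizing d with
  | nil => rfl
  | cons a l ih =>
      simp only [List.foldl_cons]
      by_cases hc : cond a
      · have hk : (d.modify (key a) 0 (· + 1)).keys = d.keys :=
          pv_keys_modify_present d (key a) _ (h a (by simp) hc)
        rw [if_pos hc, ih _ (fun b hb hcb => by rw [hk]; exact h b (by simp [hb]) hcb), hk]
      · rw [if_neg hc]
        exact ih _ (fun b hb hcb => h b (by simp [hb]) hcb)

-- keys are unchanged by A's outer mail loop when every rewarded reporter is present
theorem pv_keys_A_outer (k : Int) (items : List (String × List String))
    (d : PySem.Dict String Int)
    (h : ∀ p ∈ items, k ≤ PySem.List.len p.2 → ∀ a ∈ p.2, a ∈ d.keys) :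
    (items.foldl (fun md p => if k ≤ PySem.List.len p.2 then
        p.2.foldl (fun md reporter => md.modify reporter 0 (· + 1)) md else md) d).keys = d.keys := by
  induction items generalizing d with
  | nil => rfl
  | cons p items ih =>
      simp only [List.foldl_cons]
      by_cases hc : k ≤ PySem.List.len p.2
      · have hk : (p.2.foldl (fun md reporter => md.modify reporter 0 (· + 1)) d).keys = d.keys :=
          pv_keys_incr_fold p.2 d (h p (by simp) hc)
        rw [if_pos hc, ih _ (fun q hq hcq a ha => by rw [hk]; exact h q (by simp [hq]) hcq a ha), hk]
      · rw [if_neg hc]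
        exact ih _ (fun q hq hcq a ha => h q (by simp [hq]) hcq a ha)

-- value of a conditional increment fold (B's mail loop)
theorem pv_getD_cond_incr_fold {α : Type} (l : List α) (key : α → String) (cond : α → Prop)
    [DecidablePred cond] (d : PySem.Dict String Int) (x : String) :
    (l.foldl (fun md a => if cond a then md.modify (key a) 0 (· + 1) else md) d).getD x 0
      = d.getD x 0 + (l.countP (fun a => decide (cond a) && (key a == x)) : Int) := by
  induction l generalizing d with
  | nil => simp
  | cons a l ih =>
      simp only [List.foldl_cons, List.countP_cons]
      by_cases hc : cond a
      · rw [if_pos hc, ih, PySem.Dict.getD_modify]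
        by_cases hx : x = key a
        · subst hx
          simp only [beq_self_eq_true, hc, Bool.and_true, decide_eq_true_eq, if_true]
          push_cast
          ring
        · have hb : (key a == x) = false := beq_eq_false_iff_ne.2 (fun e => hx e.symm)
          simp only [if_neg hx, hb, Bool.and_false, Bool.false_eq_true, if_false]
          push_cast
          ring
      · have hcf : decide (cond a) = false := by simpa using hc
        simp only [if_neg hc, hcf, Bool.false_and, Bool.false_eq_true, if_false]
        rw [ih]
        push_cast
        ring

-- value of A's outer mail loop over report_dict.items
theorem pv_getD_A_outer (k : Int) (items : List (String × List String))
    (d : PySem.Dict String Int) (x : String) :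
    (items.foldl (fun md p => if k ≤ PySem.List.len p.2 then
        p.2.foldl (fun md reporter => md.modify reporter 0 (· + 1)) md else md) d).getD x 0
      = d.getD x 0
        + (items.map (fun p => if k ≤ PySem.List.len p.2 then (p.2.count x : Int) else 0)).sum := by
  induction items generalizing d with
  | nil => simp
  | cons p items ih =>
      simp only [List.foldl_cons, List.map_cons, List.sum_cons]
      by_cases hc : k ≤ PySem.List.len p.2
      · rw [if_pos hc, if_pos hc, ih, PySem.Dict.getD_foldl_modify_add_one]
        ring
      · rw [if_neg hc, if_neg hc, ih]
        ring

-- sum over a Nodup key list of a mapped term, changed at exactly one present key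
theorem pv_sum_map_update_one (K : List String) (c : String) (f : String → Int) (v : Int)
    (hnd : K.Nodup) (hc : c ∈ K) :
    (K.map (fun t => if t = c then f t + v else f t)).sum = (K.map f).sum + v := by
  induction K with
  | nil => cases hc
  | cons t K ih =>
      simp only [List.map_cons, List.sum_cons]
      rcases List.mem_cons.1 hc with h | h
      · have hrest : ∀ u ∈ K, (if u = c then f u + v else f u) = f u := by
          intro u hu
          have : u ≠ c := fun e => (List.nodup_cons.1 hnd).1 (h ▸ e ▸ hu)
          simp [this]
        rw [if_pos h.symm, List.map_congr_left hrest]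
        ring
      · have ht : t ≠ c := fun e => (List.nodup_cons.1 hnd).1 (e ▸ h)
        rw [if_neg ht, ih (List.nodup_cons.1 hnd).2 h]
        ring

-- grouping identity: summing a countP over the buckets of a covering Nodup key list
theorem pv_group_countP (K : List String) (pairs : List (String × String)) (q : String × String → Bool)
    (hnd : K.Nodup) (hcov : ∀ p ∈ pairs, p.1 ∈ K) :
    (K.map (fun t => ((pairs.filter (fun p => p.1 == t)).countP q : Int))).sum
      = (pairs.countP q : Int) := by
  induction pairs with
  | nil => simp
  | cons p pairs ih =>
      have hcov' : ∀ p' ∈ pairs, p'.1 ∈ K := fun p' hp' => hcov p' (by simp [hp'])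
      have hp1 : p.1 ∈ K := hcov p (by simp)
      have hstep : ∀ t, (((p :: pairs).filter (fun p' => p'.1 == t)).countP q : Int)
          = (if t = p.1
              then ((pairs.filter (fun p' => p'.1 == t)).countP q : Int) + (if q p then 1 else 0)
              else ((pairs.filter (fun p' => p'.1 == t)).countP q : Int)) := by
        intro t
        by_cases ht : t = p.1
        · subst ht
          rw [if_pos rfl]
          simp only [List.filter_cons, beq_self_eq_true, if_true, List.countP_cons]
          by_cases hq : q p = true
          · simp only [hq, if_true]; push_cast; ring
          · have : q p = false := by simpa using hq
            simp only [this, if_false, Bool.false_eq_true]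
            push_cast; ring
        · have hb : (p.1 == t) = false := beq_eq_false_iff_ne.2 (fun e => ht e.symm)
          rw [if_neg ht]
          simp only [List.filter_cons, hb, Bool.false_eq_true, if_false]
      calc (K.map (fun t => (((p :: pairs).filter (fun p' => p'.1 == t)).countP q : Int))).sum
          = (K.map (fun t => if t = p.1
              then ((pairs.filter (fun p' => p'.1 == t)).countP q : Int) + (if q p then 1 else 0)
              else ((pairs.filter (fun p' => p'.1 == t)).countP q : Int))).sum :=
            congrArg _ (List.map_congr_left (fun t _ => hstep t))
        _ = (K.map (fun t => ((pairs.filter (fun p' => p'.1 == t)).countP q : Int))).sum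
              + (if q p then 1 else 0) :=
            pv_sum_map_update_one K p.1 _ _ hnd hp1
        _ = (pairs.countP q : Int) + (if q p then 1 else 0) := by rw [ih hcov']
        _ = ((p :: pairs).countP q : Int) := by
            rw [List.countP_cons]
            by_cases hq : q p = true
            · simp only [hq, if_true]; push_cast; ring
            · have : q p = false := by simpa using hq
              simp only [this, if_false, Bool.false_eq_true]; push_cast; ring

-- ===== VERDICT (by name: the statement is the Claim_ definition above) =====
theorem solution_spec : Claim_equal_solution := by
  intro il rep k _hdom hpre
  unfold Spec_solution solution solution_alt
  dsimp only
  set R : List String := PySem.Set.ofList rep with hR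
  set mail0 : PySem.Dict String Int :=
    il.foldl (fun d id => d.insert id 0) PySem.Dict.empty with hmail0
  set rep0 : PySem.Dict String (List String) :=
    il.foldl (fun d id => d.insert id []) PySem.Dict.empty with hrep0
  set repD : PySem.Dict String (List String) :=
    R.foldl (fun d r => d.modify (pvTgt r) [] (fun l => l ++ [pvRep r])) rep0 with hrepD
  set cnt : PySem.Dict String Int :=
    R.foldl (fun d r => d.insert (pvTgt r) (d.getD (pvTgt r) 0 + 1)) PySem.Dict.empty with hcnt
  set pairs : List (String × String) := R.map (fun r => (pvTgt r, pvRep r)) with hpairs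
  set K : List String := repD.keys with hK
  -- the frequency table is Counter of the targets
  have hcnt_getD : ∀ t, cnt.getD t 0 = ((R.countP (fun r => pvTgt r == t)) : Int) := by
    intro t
    have h1 : cnt = PySem.Dict.counter (R.map pvTgt) := by
      rw [hcnt, ← PySem.Dict.foldl_insert_getD_add_one_eq_counter, List.foldl_map]
    rw [h1, PySem.Dict.getD_counter]
    congr 1
    rw [List.count_eq_countP, List.countP_map]
    rfl
  -- report_dict as a fold over (target, reporter) pairs
  have hrepD_pairs : repD = pairs.foldl (fun d p => d.modify p.1 [] (fun l => l ++ [p.2])) rep0 := by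
    rw [hrepD, hpairs, List.foldl_map]
  have hrep0_getD : ∀ t, rep0.getD t [] = [] := fun t =>
    pv_getD_const_init il PySem.Dict.empty t [] (PySem.Dict.getD_empty t [])
  have hbucket : ∀ t, repD.getD t [] = (pairs.filter (fun p => p.1 == t)).map Prod.snd := by
    intro t
    rw [hrepD_pairs, PySem.Dict.getD_foldl_modify_append, hrep0_getD t, List.nil_append]
  have hrep0_keys : rep0.keys = PySem.Set.ofList il := pv_keys_const_init il []
  have hK_nodup : K.Nodup := by
    rw [hK, hrepD]
    exact PySem.Dict.nodup_keys_foldl_modify_key R pvTgt [] (fun d r => fun l => l ++ [pvRep r])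
      rep0 (by rw [hrep0_keys]; exact PySem.Set.nodup_ofList il)
  have hcov : ∀ p ∈ pairs, p.1 ∈ K := by
    intro p hp
    have hkeys : K = PySem.Set.update rep0.keys (R.map pvTgt) := by
      rw [hK, hrepD, PySem.Dict.keys_foldl_modify_key]
    rcases List.mem_map.1 hp with ⟨r, hr, rfl⟩
    rw [hkeys]
    exact (PySem.Set.mem_update _ _ _).2 (Or.inr (List.mem_map_of_mem hr))
  have hitems : repD.items = K.map (fun t => (t, repD.getD t [])) :=
    PySem.Dict.items_eq_map_keys repD hK_nodup []
  -- bucket sizes are the counts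
  have hcntP_pairs : ∀ t, pairs.countP (fun p => p.1 == t) = R.countP (fun r => pvTgt r == t) := by
    intro t
    rw [hpairs, List.countP_map]
    rfl
  have hlen_bucket : ∀ t, (repD.getD t []).length = R.countP (fun r => pvTgt r == t) := by
    intro t
    rw [hbucket, List.length_map, ← List.countP_eq_length_filter, hcntP_pairs]
  -- Pre_, restated over the distinct reports
  have hpre2 : ∀ r ∈ R, pvTgt r ∈ il := by
    intro r hr
    exact (hpre r ((PySem.Set.mem_ofList rep r).1 hr)).2.1
  have hpre3 : ∀ r ∈ R, k ≤ ((R.countP (fun r' => pvTgt r' == pvTgt r)) : Int) → pvRep r ∈ il := by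
    intro r hr
    have := (hpre r ((PySem.Set.mem_ofList rep r).1 hr)).2.2
    rwa [PySem.List.dedup_eq_ofList, ← hR] at this
  have hmail0_keys : mail0.keys = PySem.Set.ofList il := pv_keys_const_init il 0
  have hmail0_getD : ∀ x, mail0.getD x 0 = 0 := fun x =>
    pv_getD_const_init il PySem.Dict.empty x 0 (PySem.Dict.getD_empty x 0)
  -- any reporter rewarded through a full bucket is a key of mail0
  have hreward : ∀ p ∈ repD.items, k ≤ PySem.List.len p.2 → ∀ a ∈ p.2, a ∈ mail0.keys := by
    rw [hitems]
    intro p hp hlen a ha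
    rcases List.mem_map.1 hp with ⟨t, _ht, rfl⟩
    have ha' : a ∈ (pairs.filter (fun p => p.1 == t)).map Prod.snd := by
      rw [← hbucket t]; exact ha
    rcases List.mem_map.1 ha' with ⟨pr, hprf, rfl⟩
    have hpr_mem : pr ∈ pairs := (List.mem_filter.1 hprf).1
    have hpr_t : pr.1 = t := eq_of_beq (List.mem_filter.1 hprf).2
    rcases List.mem_map.1 hpr_mem with ⟨r, hr, rfl⟩
    have hk : k ≤ ((R.countP (fun r' => pvTgt r' == pvTgt r)) : Int) := by
      have := hlen
      rw [PySem.List.len_eq, hlen_bucket t] at this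
      simpa [← hpr_t] using this
    rw [hmail0_keys]
    exact (PySem.Set.mem_ofList il _).2 (hpre3 r hr hk)
  -- keys of both final dicts are mail0's keys
  have hkeysA : ((repD.items.foldl (fun md p => if k ≤ PySem.List.len p.2 then
      p.2.foldl (fun md reporter => md.modify reporter 0 (· + 1)) md else md) mail0)).keys
        = mail0.keys := pv_keys_A_outer k repD.items mail0 hreward
  have hkeysB : ((R.foldl (fun md r => if k ≤ cnt.getD (pvTgt r) 0
        then md.modify (pvRep r) 0 (· + 1) else md) mail0)).keys = mail0.keys := by
    refine pv_keys_modify_fold R pvRep (fun r => k ≤ cnt.getD (pvTgt r) 0) mail0 ?_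
    intro r hr hc
    rw [hmail0_keys]
    refine (PySem.Set.mem_ofList il _).2 (hpre3 r hr ?_)
    rwa [hcnt_getD (pvTgt r)] at hc
  -- pointwise value equality
  have hval : ∀ x,
      ((repD.items.foldl (fun md p => if k ≤ PySem.List.len p.2 then
        p.2.foldl (fun md reporter => md.modify reporter 0 (· + 1)) md else md) mail0)).getD x 0
      = ((R.foldl (fun md r => if k ≤ cnt.getD (pvTgt r) 0
        then md.modify (pvRep r) 0 (· + 1) else md) mail0)).getD x 0 := by
    intro x
    set q : String × String → Bool :=
      fun p => decide (k ≤ cnt.getD p.1 0) && (p.2 == x) with hq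
    have hterm : ∀ t, (if k ≤ PySem.List.len (repD.getD t [])
        then (((repD.getD t []).count x : Int)) else 0)
        = (((pairs.filter (fun p => p.1 == t)).countP q : Int)) := by
      intro t
      rw [PySem.List.len_eq, hlen_bucket t]
      by_cases hcase : k ≤ cnt.getD t 0
      · have hc' : k ≤ ((R.countP (fun r => pvTgt r == t)) : Int) := by
          rwa [hcnt_getD t] at hcase
        rw [if_pos hc', hbucket t, List.count_eq_countP, List.countP_map]
        congr 1
        refine List.countP_congr ?_
        intro p hp
        have hpt : p.1 = t := eq_of_beq (List.mem_filter.1 hp).2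
        rw [hq]
        simp only [Function.comp, hpt, hcase, decide_true, Bool.true_and]
      · have hc' : ¬ k ≤ ((R.countP (fun r => pvTgt r == t)) : Int) := by
          rwa [hcnt_getD t] at hcase
        rw [if_neg hc']
        symm
        norm_cast
        rw [List.countP_eq_zero]
        intro p hp
        have hpt : p.1 = t := eq_of_beq (List.mem_filter.1 hp).2
        rw [hq]
        simp [hpt, hcase]
    rw [pv_getD_A_outer, pv_getD_cond_incr_fold R pvRep (fun r => k ≤ cnt.getD (pvTgt r) 0) mail0 x,
      hitems, List.map_map]
    congr 1
    have : ((K.map ((fun p : String × List String => if k ≤ PySem.List.len p.2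
          then ((p.2.count x : Int)) else 0) ∘ (fun t => (t, repD.getD t [])))).sum)
        = (K.map (fun t => (((pairs.filter (fun p => p.1 == t)).countP q : Int)))).sum := by
      refine congrArg _ (List.map_congr_left ?_)
      intro t _
      exact hterm t
    rw [this, pv_group_countP K pairs q hK_nodup hcov, hpairs, List.countP_map]
    rfl
  -- both results are the values of dicts with equal keys and equal lookups
  have hndA : ((repD.items.foldl (fun md p => if k ≤ PySem.List.len p.2 then
      p.2.foldl (fun md reporter => md.modify reporter 0 (· + 1)) md else md) mail0)).keys.Nodup := by
    rw [hkeysA, hmail0_keys]; exact PySem.Set.nodup_ofList il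
  have hndB : ((R.foldl (fun md r => if k ≤ cnt.getD (pvTgt r) 0
      then md.modify (pvRep r) 0 (· + 1) else md) mail0)).keys.Nodup := by
    rw [hkeysB, hmail0_keys]; exact PySem.Set.nodup_ofList il
  rw [PySem.Dict.values_eq_map_keys _ hndA 0, PySem.Dict.values_eq_map_keys _ hndB 0,
    hkeysA, hkeysB]
  exact List.map_congr_left (fun x _ => hval x)
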